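-- pv_equiv track=rewrite | github.com/shyorangeshy/Code | EDBase/train.py | merge_strategy
-- ===== SOURCE A (Python) =====
-- def merge_strategy(gt_labels, pt_labels, merge_index):
--     ori_gt_labels = list()
--     ori_pt_labels = list()
--     flag = -1
--
--     # 取被切分成的几个部分的token的最左边的一份
--     for i in range(len(merge_index)):
--         if merge_index[i] < 0 or flag == merge_index[i]: # 注意这里是merge[i]而不是i
--             continue
--         else:
--             ori_gt_labels.append(gt_labels[i])
--             ori_pt_labels.append(pt_labels[i])
--             flag = merge_index[i]
--
--     assert len(ori_gt_labels) == len(ori_pt_labels)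
--     return ori_gt_labels, ori_pt_labels
-- ===== SOURCE B (Python) =====
-- def merge_strategy(gt_labels, pt_labels, merge_index):
--     # positions carrying a non-negative merge index, in order
--     idxs = [i for i in range(len(merge_index)) if merge_index[i] >= 0]
--     vals = [merge_index[i] for i in idxs]
--     # keep the first position of each maximal run of equal merge values
--     firsts = [i for i, v, pv in zip(idxs, vals, [-1] + vals) if v != pv]
--     ori_gt_labels = [gt_labels[i] for i in firsts]
--     ori_pt_labels = [pt_labels[i] for i in firsts]
--     assert len(ori_gt_labels) == len(ori_pt_labels)
--     return ori_gt_labels, ori_pt_labels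
-- ===== Notes on version B (the rewrite author's own statement) =====
-- stated objective: simpler
-- what changed: Replaces the stateful flag-carrying scan with a pipeline: filter the non-negative positions, then keep the first position of each run of equal merge values via a shifted zip, and map the label lists over those positions.
import Mathlib
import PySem

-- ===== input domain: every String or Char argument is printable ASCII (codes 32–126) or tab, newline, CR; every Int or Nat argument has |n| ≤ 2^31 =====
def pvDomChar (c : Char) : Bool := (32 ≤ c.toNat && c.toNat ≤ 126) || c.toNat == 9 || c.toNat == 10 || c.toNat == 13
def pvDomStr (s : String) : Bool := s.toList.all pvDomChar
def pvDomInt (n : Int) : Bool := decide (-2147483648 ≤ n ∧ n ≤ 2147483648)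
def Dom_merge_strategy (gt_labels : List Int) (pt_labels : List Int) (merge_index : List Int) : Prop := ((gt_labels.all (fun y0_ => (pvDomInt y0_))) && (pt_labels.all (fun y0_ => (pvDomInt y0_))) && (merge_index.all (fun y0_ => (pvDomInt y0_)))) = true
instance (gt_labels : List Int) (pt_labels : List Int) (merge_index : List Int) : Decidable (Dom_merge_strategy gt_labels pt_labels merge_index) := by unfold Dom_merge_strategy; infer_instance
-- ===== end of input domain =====

-- B replaces A's stateful flag-scan by a filter (non-negative positions) plus a
-- first-of-run selection via a shifted zip; objective: simpler decomposition, no speed claim.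


-- ===== PORT A =====
-- A's loop over range(len(merge_index)) with state (ori_gt, ori_pt, flag); indexing
-- gt_labels[i]/pt_labels[i] is ported as getD (Python raises IndexError out of range —
-- exactly those inputs are excluded by Pre_); merge_index[i] always has i in range.
def merge_strategy (gt_labels : List Int) (pt_labels : List Int) (merge_index : List Int) : List Int × List Int :=
  let s := (List.range merge_index.length).foldl
    (fun (st : List Int × List Int × Int) i =>
      if merge_index.getD i 0 < 0 ∨ st.2.2 = merge_index.getD i 0 then st
      else (st.1 ++ [gt_labels.getD i 0], st.2.1 ++ [pt_labels.getD i 0], merge_index.getD i 0))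
    ([], [], -1)
  (s.1, s.2.1)

-- ===== PORT B =====
def merge_strategy_alt (gt_labels : List Int) (pt_labels : List Int) (merge_index : List Int) : List Int × List Int :=
  let idxs := (List.range merge_index.length).filter (fun i => 0 ≤ merge_index.getD i 0)
  let vals := idxs.map (fun i => merge_index.getD i 0)
  let firsts := ((idxs.zip (vals.zip ((-1 : Int) :: vals))).filter
      (fun t => t.2.1 ≠ t.2.2)).map (fun t => t.1)
  (firsts.map (fun i => gt_labels.getD i 0), firsts.map (fun i => pt_labels.getD i 0))

-- ===== PRECONDITION & SPEC =====
-- Exactly the inputs on which Python A returns (no IndexError): every position the scan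
-- selects (non-negative merge value whose last preceding non-negative value differs)
-- must be in range of both label lists.
def Pre_merge_strategy (gt_labels : List Int) (pt_labels : List Int) (merge_index : List Int) : Prop :=
  ∀ i, i < merge_index.length → 0 ≤ merge_index.getD i 0 →
    (¬ ∃ j, j < i ∧ 0 ≤ merge_index.getD j 0 ∧ merge_index.getD j 0 = merge_index.getD i 0 ∧
        ∀ k, k < i → j < k → merge_index.getD k 0 < 0) →
    i < gt_labels.length ∧ i < pt_labels.length
instance (gt_labels : List Int) (pt_labels : List Int) (merge_index : List Int) : Decidable (Pre_merge_strategy gt_labels pt_labels merge_index) := by unfold Pre_merge_strategy; infer_instance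
def pvWitness_merge_strategy : List Int × List Int × List Int := ([10, 20, 30], [1, 2, 3], [0, 0, 1])

def Spec_merge_strategy (gt_labels : List Int) (pt_labels : List Int) (merge_index : List Int) (out : List Int × List Int) : Prop := out = merge_strategy_alt gt_labels pt_labels merge_index
instance (gt_labels : List Int) (pt_labels : List Int) (merge_index : List Int) (out : List Int × List Int) : Decidable (Spec_merge_strategy gt_labels pt_labels merge_index out) := by unfold Spec_merge_strategy; infer_instance

-- ===== CLAIM (what is proved, stated in full; the proofs are below) =====
def Claim_equal_merge_strategy : Prop := ∀ (gt_labels : List Int) (pt_labels : List Int) (merge_index : List Int), Dom_merge_strategy gt_labels pt_labels merge_index → Pre_merge_strategy gt_labels pt_labels merge_index → Spec_merge_strategy gt_labels pt_labels merge_index (merge_strategy gt_labels pt_labels merge_index)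

-- ===== LEMMAS AND PROOFS =====

-- the list of positions the scan selects, starting at index i with k steps left and flag f
def selFrom (mi : List Int) : Nat → Nat → Int → List Nat
  | _, 0, _ => []
  | i, k+1, f =>
    if mi.getD i 0 < 0 ∨ f = mi.getD i 0 then selFrom mi (i+1) k f
    else i :: selFrom mi (i+1) k (mi.getD i 0)

-- the flag after the scan
def flagFrom (mi : List Int) : Nat → Nat → Int → Int
  | _, 0, f => f
  | i, k+1, f =>
    if mi.getD i 0 < 0 ∨ f = mi.getD i 0 then flagFrom mi (i+1) k f
    else flagFrom mi (i+1) k (mi.getD i 0)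

theorem foldlA_eq (gt pt mi : List Int) :
    ∀ (k i : Nat) (og op : List Int) (f : Int),
    (List.range' i k).foldl
      (fun (st : List Int × List Int × Int) j =>
        if mi.getD j 0 < 0 ∨ st.2.2 = mi.getD j 0 then st
        else (st.1 ++ [gt.getD j 0], st.2.1 ++ [pt.getD j 0], mi.getD j 0))
      (og, op, f)
    = (og ++ (selFrom mi i k f).map (fun j => gt.getD j 0),
       op ++ (selFrom mi i k f).map (fun j => pt.getD j 0),
       flagFrom mi i k f) := by
  intro k
  induction k with
  | zero => intro i og op f; simp [selFrom, flagFrom]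
  | succ k ih =>
    intro i og op f
    rw [List.range'_succ]
    simp only [List.foldl_cons]
    by_cases h : mi.getD i 0 < 0 ∨ f = mi.getD i 0
    · simp only [selFrom, flagFrom, if_pos h, ih]
    · simp only [selFrom, flagFrom, if_neg h, ih]
      simp

-- B's shifted-zip run-first selection, characterised recursively
def dedup (mi : List Int) : List Nat → Int → List Nat
  | [], _ => []
  | i :: rest, pv =>
    if mi.getD i 0 = pv then dedup mi rest pv else i :: dedup mi rest (mi.getD i 0)

theorem zip_firsts_eq (mi : List Int) :
    ∀ (idxs : List Nat) (pv : Int),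
    ((idxs.zip ((idxs.map (fun i => mi.getD i 0)).zip
        (pv :: idxs.map (fun i => mi.getD i 0)))).filter
      (fun t => t.2.1 ≠ t.2.2)).map (fun t => t.1)
    = dedup mi idxs pv := by
  intro idxs
  induction idxs with
  | nil => intro pv; simp [dedup]
  | cons i rest ih =>
    intro pv
    simp only [List.map_cons, List.zip_cons_cons, List.filter_cons, dedup, List.getD] at *
    by_cases h : mi[i]?.getD 0 = pv
    · simp only [if_pos h]
      simpa [h] using ih pv
    · simp only [if_neg h]
      simpa [h] using ih (mi[i]?.getD 0)

theorem dedup_filter_eq (mi : List Int) :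
    ∀ (k i : Nat) (f : Int),
    dedup mi ((List.range' i k).filter (fun j => 0 ≤ mi.getD j 0)) f
    = selFrom mi i k f := by
  intro k
  induction k with
  | zero => intro i f; simp [selFrom, dedup]
  | succ k ih =>
    intro i f
    rw [List.range'_succ, List.filter_cons]
    by_cases hneg : 0 ≤ mi.getD i 0
    · rw [if_pos (by simpa using hneg)]
      simp only [dedup, selFrom]
      split_ifs with h1 h2 h3
      · rw [ih]
      · exact absurd (Or.inr h1.symm) h2
      · exact absurd (h3.resolve_left (by omega)).symm h1
      · rw [ih]
    · rw [if_neg (by simpa using hneg)]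
      simp only [selFrom]
      rw [if_pos (Or.inl (by omega)), ih]

-- ===== VERDICT (by name: the statement is the Claim_ definition above) =====
theorem merge_strategy_spec : Claim_equal_merge_strategy := by
  intro gt pt mi _ _
  unfold Spec_merge_strategy merge_strategy merge_strategy_alt
  simp only [List.range_eq_range']
  rw [foldlA_eq, zip_firsts_eq, dedup_filter_eq]
  simp
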